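-- pv_equiv track=rewrite | github.com/TODOTODoTOdoTodotodo/storyboarder | skills/prd-author/scripts/extract_doc_text.py | _collapse_lines
-- ===== SOURCE A (Python) =====
-- from typing import Iterable, List
--
-- def _collapse_lines(lines: Iterable[str]) -> str:
--     cleaned: List[str] = []
--     last_blank = False
--     for line in lines:
--         if line is None:
--             continue
--         stripped = line.strip()
--         if not stripped:
--             if not last_blank:
--                 cleaned.append("")
--                 last_blank = True
--             continue
--         cleaned.append(stripped)
--         last_blank = False
--     return "\n".join(cleaned).strip()
-- ===== SOURCE B (Python) =====
-- from typing import Iterable, List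
--
-- def _collapse_lines(lines: Iterable[str]) -> str:
--     runs: List[List[str]] = []
--     cur: List[str] = []
--     for line in lines:
--         if line is None:
--             continue
--         s = line.strip()
--         if s:
--             cur.append(s)
--         elif cur:
--             runs.append(cur)
--             cur = []
--     if cur:
--         runs.append(cur)
--     return "\n\n".join("\n".join(r) for r in runs)
-- ===== Notes on version B (the rewrite author's own statement) =====
-- stated objective: simpler
-- what changed: B drops A's last_blank flag and the final strip of the joined text: it groups the stripped non-blank lines into consecutive runs and joins the runs with a double newline, which yields the collapsed, edge-trimmed text directly.
import Mathlib
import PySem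

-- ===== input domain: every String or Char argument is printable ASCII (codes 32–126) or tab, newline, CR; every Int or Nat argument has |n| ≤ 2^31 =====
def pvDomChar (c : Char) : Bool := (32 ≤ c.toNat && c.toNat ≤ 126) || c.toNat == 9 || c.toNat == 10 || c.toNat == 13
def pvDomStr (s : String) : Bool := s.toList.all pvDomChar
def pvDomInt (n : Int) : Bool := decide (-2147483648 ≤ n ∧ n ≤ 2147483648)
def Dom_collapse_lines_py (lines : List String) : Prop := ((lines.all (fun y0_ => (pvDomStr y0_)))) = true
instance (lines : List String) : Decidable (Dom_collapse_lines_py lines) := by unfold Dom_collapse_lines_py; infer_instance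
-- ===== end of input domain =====

-- B replaces A's last-blank flag and final strip by grouping the stripped lines into runs
-- of non-blank lines and joining the runs with a double newline (objective: simpler).

-- ===== PORT A =====
-- one step of A's loop: state = (cleaned, last_blank)
def pvStepA (acc : List String × Bool) (line : String) : List String × Bool :=
  let stripped := PySem.Str.strip line
  if stripped = "" then
    if acc.2 = false then (acc.1 ++ [""], true) else acc
  else (acc.1 ++ [stripped], false)

def collapse_lines_py (lines : List String) : String :=
  let st := lines.foldl pvStepA ([], false)
  PySem.Str.strip (PySem.Str.join "\n" st.1)

-- ===== PORT B =====
-- one step of B's loop: state = (runs, cur)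
def pvStepB (acc : List (List String) × List String) (line : String) :
    List (List String) × List String :=
  let s := PySem.Str.strip line
  if s ≠ "" then (acc.1, acc.2 ++ [s])
  else if acc.2 ≠ [] then (acc.1 ++ [acc.2], [])
  else acc

def collapse_lines_py_alt (lines : List String) : String :=
  let st := lines.foldl pvStepB ([], [])
  let runs := if st.2 ≠ [] then st.1 ++ [st.2] else st.1
  PySem.Str.join "\n\n" (runs.map (PySem.Str.join "\n"))

-- ===== PRECONDITION & SPEC =====
def Spec_collapse_lines_py (lines : List String) (out : String) : Prop := out = collapse_lines_py_alt lines
instance (lines : List String) (out : String) : Decidable (Spec_collapse_lines_py lines out) := by unfold Spec_collapse_lines_py; infer_instance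

-- ===== CLAIM (what is proved, stated in full; the proofs are below) =====
def Claim_equal_collapse_lines_py : Prop := ∀ (lines : List String), Dom_collapse_lines_py lines → Spec_collapse_lines_py lines (collapse_lines_py lines)

-- ===== LEMMAS AND PROOFS =====

-- a char list whose first and last characters (if any) are not whitespace
def pvFix (cs : List Char) : Prop :=
  (∀ c, cs.head? = some c → PySem.Chars.isspace c = false) ∧
  (∀ c, cs.getLast? = some c → PySem.Chars.isspace c = false)

-- a string already stripped and non-empty
def pvGood (s : String) : Prop := s ≠ "" ∧ PySem.Str.strip s = s

-- the collapsed line list represented from B's state: runs separated by single blanks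
def pvGlue : List (List String) → List String
  | [] => []
  | r :: rs => r ++ rs.flatMap (fun r' => "" :: r')

def pvRR (runs : List (List String)) (cur : List String) : List (List String) :=
  runs ++ (if cur = [] then [] else [cur])

def pvInv (cleaned : List String) (lb : Bool) (runs : List (List String))
    (cur : List String) (lead : Bool) : Prop :=
  cleaned = (if lead then [""] else []) ++ pvGlue (pvRR runs cur) ++
      (if lb = true ∧ pvRR runs cur ≠ [] then [""] else [])
  ∧ (lb = true → cur = [])
  ∧ (lead = true → (lb = true ∨ pvRR runs cur ≠ []))
  ∧ (lb = false ∧ cur = [] → runs = [] ∧ lead = false)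
  ∧ (∀ r ∈ runs, r ≠ [] ∧ ∀ s ∈ r, pvGood s)
  ∧ (∀ s ∈ cur, pvGood s)

lemma pvhead?_dropWhile (p : Char → Bool) (cs : List Char) (c : Char)
    (h : (cs.dropWhile p).head? = some c) : p c = false := by
  induction cs with
  | nil => simp [List.dropWhile] at h
  | cons a l ih =>
    by_cases hpa : p a
    · simpa [List.dropWhile, hpa] using ih (by simpa [List.dropWhile, hpa] using h)
    · simp [List.dropWhile, hpa] at h
      simpa [← h] using hpa

lemma pvlstrip_fix_head (cs : List Char) (c : Char)
    (h : (PySem.Chars.lstrip cs).head? = some c) : PySem.Chars.isspace c = false := by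
  exact pvhead?_dropWhile _ _ _ h

lemma pvrstrip_prefix (cs : List Char) : PySem.Chars.rstrip cs <+: cs := by
  have := List.dropWhile_suffix (l := cs.reverse) (p := PySem.Chars.isspace)
  have h2 := List.IsSuffix.reverse this
  simpa [PySem.Chars.rstrip] using h2

lemma pvstrip_fix (cs : List Char) : pvFix (PySem.Chars.strip cs) := by
  constructor
  · intro c hc
    simp only [PySem.Chars.strip] at hc
    obtain ⟨t, ht⟩ := pvrstrip_prefix (PySem.Chars.lstrip cs)
    have hh : (PySem.Chars.lstrip cs).head? = some c := by
      rw [← ht]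
      cases hrw : PySem.Chars.rstrip (PySem.Chars.lstrip cs) with
      | nil => rw [hrw] at hc; simp at hc
      | cons a l =>
        rw [hrw] at hc
        simp at hc
        simpa using hc
    exact pvlstrip_fix_head _ _ hh
  · intro c hc
    simp only [PySem.Chars.strip, PySem.Chars.rstrip] at hc
    rw [List.getLast?_reverse] at hc
    exact pvhead?_dropWhile _ _ _ hc

lemma pvfix_strip_eq (cs : List Char) (h : pvFix cs) : PySem.Chars.strip cs = cs := by
  have hl : PySem.Chars.lstrip cs = cs := by
    cases cs with
    | nil => rfl
    | cons a l =>
      have := h.1 a (by simp)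
      simp [PySem.Chars.lstrip, List.dropWhile, this]
  have hr : PySem.Chars.rstrip cs = cs := by
    rcases hrl : cs.reverse with _ | ⟨a, l⟩
    · have : cs = [] := by simpa using congrArg List.reverse hrl
      simp [this, PySem.Chars.rstrip]
    · have hla : cs.getLast? = some a := by
        rw [← List.head?_reverse]; simp [hrl]
      have hns := h.2 a hla
      have h1 : PySem.Chars.rstrip cs = (a :: l).reverse := by
        simp [PySem.Chars.rstrip, hrl, hns]
      rw [h1, ← hrl, List.reverse_reverse]
  simp [PySem.Chars.strip, hl, hr]

lemma pvgood_strip (line : String) (h : PySem.Str.strip line ≠ "") :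
    pvGood (PySem.Str.strip line) := by
  refine ⟨h, ?_⟩
  have : PySem.Chars.strip (PySem.Str.strip line).toList = (PySem.Str.strip line).toList := by
    rw [PySem.Str.toList_strip]
    exact pvfix_strip_eq _ (pvstrip_fix _)
  have := congrArg String.ofList this
  simpa [PySem.Str.strip] using this

lemma pvgood_fix (s : String) (h : pvGood s) : pvFix s.toList := by
  have : PySem.Chars.strip s.toList = s.toList := by
    have := congrArg String.toList h.2
    simpa [PySem.Str.toList_strip] using this
  rw [← this]; exact pvstrip_fix _

-- pvGlue equations and the appended-run law
lemma pvglue_cons_cons (r r2 : List String) (rs : List (List String)) :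
    pvGlue (r :: r2 :: rs) = r ++ [""] ++ pvGlue (r2 :: rs) := by
  simp [pvGlue]

lemma pvglue_append (runs : List (List String)) (x : List String) :
    pvGlue (runs ++ [x]) = if runs = [] then x else pvGlue runs ++ [""] ++ x := by
  cases runs with
  | nil => simp [pvGlue]
  | cons r rs => simp [pvGlue]

lemma pvglue_ne_nil (rr : List (List String)) (hne : rr ≠ []) (h : ∀ r ∈ rr, r ≠ []) :
    pvGlue rr ≠ [] := by
  cases rr with
  | nil => exact absurd rfl hne
  | cons r rs =>
    have := h r (by simp)
    simp [pvGlue, this]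

-- Chars.join basics
lemma pvjoin_cons (sep : List Char) (x : List Char) (ys : List (List Char)) (h : ys ≠ []) :
    PySem.Chars.join sep (x :: ys) = x ++ sep ++ PySem.Chars.join sep ys := by
  cases ys with
  | nil => exact absurd rfl h
  | cons y zs => simpa using PySem.Chars.join_cons_cons sep x y zs

lemma pvjoin_append (sep : List Char) (xs ys : List (List Char)) (hx : xs ≠ []) (hy : ys ≠ []) :
    PySem.Chars.join sep (xs ++ ys) =
      PySem.Chars.join sep xs ++ sep ++ PySem.Chars.join sep ys := by
  induction xs with
  | nil => exact absurd rfl hx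
  | cons x xs ih =>
    cases xs with
    | nil => simp [PySem.Chars.join_singleton, pvjoin_cons sep x ys hy]
    | cons x2 xs2 =>
      rw [List.cons_append, pvjoin_cons sep x ((x2 :: xs2) ++ ys) (by simp),
          pvjoin_cons sep x (x2 :: xs2) (by simp), ih (by simp)]
      simp

lemma pvjoin_ne_nil (sep : List Char) (ps : List (List Char)) (hne : ps ≠ [])
    (h : ∀ p ∈ ps, p ≠ []) : PySem.Chars.join sep ps ≠ [] := by
  cases ps with
  | nil => exact absurd rfl hne
  | cons x ys =>
    cases ys with
    | nil =>
      simpa [PySem.Chars.join_singleton] using h x (by simp)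
    | cons y zs =>
      rw [pvjoin_cons sep x (y :: zs) (by simp)]
      have := h x (by simp)
      simp [this]

lemma pvfix_append_left (x rest : List Char) (hx : x ≠ []) (hfx : pvFix x)
    (hc : ∀ c, (x ++ rest).getLast? = some c → PySem.Chars.isspace c = false) :
    pvFix (x ++ rest) := by
  refine ⟨?_, hc⟩
  intro c hcc
  cases x with
  | nil => exact absurd rfl hx
  | cons a l =>
    simp at hcc
    exact hfx.1 c (by simp [hcc])

lemma pvfix_join (sep : List Char) (ps : List (List Char))
    (h : ∀ p ∈ ps, p ≠ [] ∧ pvFix p) : pvFix (PySem.Chars.join sep ps) := by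
  induction ps with
  | nil => exact ⟨by simp [PySem.Chars.join_nil], by simp [PySem.Chars.join_nil]⟩
  | cons x ys ih =>
    cases ys with
    | nil => simpa [PySem.Chars.join_singleton] using (h x (by simp)).2
    | cons y zs =>
      rw [pvjoin_cons sep x (y :: zs) (by simp)]
      have hx := h x (by simp)
      have hys : ∀ p ∈ y :: zs, p ≠ [] ∧ pvFix p := fun p hp => h p (by simp [hp])
      have hj := ih hys
      have hjne : PySem.Chars.join sep (y :: zs) ≠ [] :=
        pvjoin_ne_nil sep (y :: zs) (by simp) (fun p hp => (hys p hp).1)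
      rw [List.append_assoc]
      refine pvfix_append_left x (sep ++ PySem.Chars.join sep (y :: zs)) hx.1 hx.2 ?_
      intro c hc
      rw [List.getLast?_append_of_ne_nil x (by simp [hjne]),
          List.getLast?_append_of_ne_nil sep hjne] at hc
      exact hj.2 c hc

-- strip absorbs a leading / trailing newline
lemma pvstrip_cons_nl (cs : List Char) : PySem.Chars.strip ('\n' :: cs) = PySem.Chars.strip cs := by
  simp [PySem.Chars.strip, PySem.Chars.lstrip, List.dropWhile, show PySem.Chars.isspace '\n' = true from by decide]

lemma pvrstrip_append_nl (cs : List Char) :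
    PySem.Chars.rstrip (cs ++ ['\n']) = PySem.Chars.rstrip cs := by
  have hrev : (cs ++ ['\n']).reverse = '\n' :: cs.reverse := by simp
  simp only [PySem.Chars.rstrip, hrev, List.dropWhile_cons]
  simp [show PySem.Chars.isspace '\n' = true from by decide]

lemma pvstrip_append_nl (cs : List Char) :
    PySem.Chars.strip (cs ++ ['\n']) = PySem.Chars.strip cs := by
  by_cases h : PySem.Chars.lstrip cs = []
  · have h2 : PySem.Chars.lstrip (cs ++ ['\n']) = [] := by
      simp only [PySem.Chars.lstrip] at h
      simp [PySem.Chars.lstrip, List.dropWhile_append, h, List.dropWhile,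
        show PySem.Chars.isspace '\n' = true from by decide]
    simp [PySem.Chars.strip, h, h2, PySem.Chars.rstrip]
  · have h2 : PySem.Chars.lstrip (cs ++ ['\n']) = PySem.Chars.lstrip cs ++ ['\n'] := by
      simp only [PySem.Chars.lstrip, List.dropWhile_append]
      simp [PySem.Chars.lstrip] at h
      simp [h]
    simp [PySem.Chars.strip, h2, pvrstrip_append_nl]

lemma pvempty_toList : ("" : String).toList = [] := by decide

lemma pvstrip_nil : PySem.Chars.strip [] = [] := rfl

lemma pvtoList_ne_nil (s : String) (h : s ≠ "") : s.toList ≠ [] := by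
  intro hn
  apply h
  apply String.toList_inj.mp
  rw [hn, pvempty_toList]

lemma pvstrip_join_blank_left (xs : List (List Char)) (hxs : xs ≠ []) :
    PySem.Chars.strip (PySem.Chars.join ['\n'] ([[]] ++ xs)) =
      PySem.Chars.strip (PySem.Chars.join ['\n'] xs) := by
  rw [pvjoin_append ['\n'] [[]] xs (by simp) hxs, PySem.Chars.join_singleton]
  simpa using pvstrip_cons_nl (PySem.Chars.join ['\n'] xs)

lemma pvstrip_join_blank_right (xs : List (List Char)) (hxs : xs ≠ []) :
    PySem.Chars.strip (PySem.Chars.join ['\n'] (xs ++ [[]])) =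
      PySem.Chars.strip (PySem.Chars.join ['\n'] xs) := by
  rw [pvjoin_append ['\n'] xs [[]] hxs (by simp), PySem.Chars.join_singleton]
  simpa using pvstrip_append_nl (PySem.Chars.join ['\n'] xs)

-- the main join identity: A's single glued list vs B's run-of-runs
lemma pvjoin_glue (rr : List (List String)) (h : ∀ r ∈ rr, r ≠ []) :
    PySem.Chars.join ['\n'] ((pvGlue rr).map String.toList) =
      PySem.Chars.join ['\n', '\n']
        (rr.map (fun r => PySem.Chars.join ['\n'] (r.map String.toList))) := by
  induction rr with
  | nil => simp [pvGlue, PySem.Chars.join_nil]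
  | cons r rs ih =>
    cases rs with
    | nil => simp [pvGlue, PySem.Chars.join_singleton]
    | cons r2 rs2 =>
      have hr : r ≠ [] := h r (by simp)
      have hrest : ∀ x ∈ r2 :: rs2, x ≠ [] := fun x hx => h x (by simp [hx])
      have hglue_ne : pvGlue (r2 :: rs2) ≠ [] := pvglue_ne_nil _ (by simp) hrest
      rw [pvglue_cons_cons, List.append_assoc, List.map_append, List.map_append]
      rw [pvjoin_append ['\n'] (r.map String.toList)
            ([""].map String.toList ++ (pvGlue (r2 :: rs2)).map String.toList)
            (by simpa using hr) (by simp),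
          pvjoin_append ['\n'] ([""].map String.toList) ((pvGlue (r2 :: rs2)).map String.toList)
            (by simp) (by simpa using hglue_ne)]
      rw [ih hrest]
      simp only [List.map_cons, PySem.Chars.join_cons_cons]
      simp [PySem.Chars.join_singleton]

-- the inner joined text is already stripped
lemma pvfix_inner (rr : List (List String)) (h : ∀ r ∈ rr, r ≠ [] ∧ ∀ s ∈ r, pvGood s) :
    pvFix (PySem.Chars.join ['\n'] ((pvGlue rr).map String.toList)) := by
  rw [pvjoin_glue rr (fun r hr => (h r hr).1)]
  refine pvfix_join _ _ ?_
  intro p hp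
  simp at hp
  obtain ⟨r, hr, hpr⟩ := hp
  obtain ⟨hrne, hgood⟩ := h r hr
  constructor
  · rw [← hpr]
    exact pvjoin_ne_nil _ _ (by simpa using hrne)
      (by intro q hq; simp at hq; obtain ⟨s, hs, hsq⟩ := hq
          rw [← hsq]; exact pvtoList_ne_nil s (hgood s hs).1)
  · rw [← hpr]
    refine pvfix_join _ _ ?_
    intro q hq
    simp at hq
    obtain ⟨s, hs, hsq⟩ := hq
    refine ⟨?_, ?_⟩
    · rw [← hsq]; exact pvtoList_ne_nil s (hgood s hs).1
    · rw [← hsq]; exact pvgood_fix s (hgood s hs)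

-- final accounting: from the invariant, A's finish equals B's finish
lemma pvfinal (cleaned : List String) (lb : Bool) (runs : List (List String))
    (cur : List String) (lead : Bool) (hInv : pvInv cleaned lb runs cur lead) :
    PySem.Str.strip (PySem.Str.join "\n" cleaned) =
      PySem.Str.join "\n\n"
        ((if cur ≠ [] then runs ++ [cur] else runs).map (PySem.Str.join "\n")) := by
  obtain ⟨hcl, hlbcur, hlead, hinit, hruns, hcur⟩ := hInv
  have hrr : (if cur ≠ [] then runs ++ [cur] else runs) = pvRR runs cur := by
    by_cases hc : cur = [] <;> simp [pvRR, hc]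
  rw [hrr]
  have hgoodrr : ∀ r ∈ pvRR runs cur, r ≠ [] ∧ ∀ s ∈ r, pvGood s := by
    intro r hrm
    simp only [pvRR] at hrm
    rcases List.mem_append.mp hrm with hm | hm
    · exact hruns r hm
    · by_cases hc : cur = []
      · simp [hc] at hm
      · simp [hc] at hm
        subst hm
        exact ⟨hc, hcur⟩
  -- reduce to char level
  apply String.toList_inj.mp
  rw [PySem.Str.toList_strip, PySem.Str.toList_join, PySem.Str.toList_join]
  have hmapmap : (List.map (PySem.Str.join "\n") (pvRR runs cur)).map String.toList =
      (pvRR runs cur).map (fun r => PySem.Chars.join ['\n'] (r.map String.toList)) := by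
    rw [List.map_map]
    apply List.map_congr_left
    intro r _
    simp [PySem.Str.toList_join]
  rw [hmapmap]
  have hnl : ("\n" : String).toList = ['\n'] := by decide
  have hnl2 : ("\n\n" : String).toList = ['\n', '\n'] := by decide
  rw [hnl, hnl2]
  by_cases hrre : pvRR runs cur = []
  · -- no content: cleaned is [] or [""]
    rw [hrre] at hcl
    simp only [hrre, List.map_nil, PySem.Chars.join_nil]
    simp only [pvGlue, ne_eq, not_true_eq_false, and_false, if_false, List.append_nil] at hcl
    rw [hcl]
    by_cases hld : lead = true
    · simp [hld, PySem.Chars.join_singleton, pvstrip_nil]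
    · simp [hld, PySem.Chars.join_nil, pvstrip_nil]
  · -- rr nonempty
    have hfixinner := pvfix_inner (pvRR runs cur) hgoodrr
    have hglue_ne : pvGlue (pvRR runs cur) ≠ [] :=
      pvglue_ne_nil _ hrre (fun r hr => (hgoodrr r hr).1)
    have hGmap : (pvGlue (pvRR runs cur)).map String.toList ≠ [] := by simpa using hglue_ne
    have hcore : PySem.Chars.strip
        (PySem.Chars.join ['\n'] ((pvGlue (pvRR runs cur)).map String.toList)) =
        PySem.Chars.join ['\n', '\n']
          ((pvRR runs cur).map (fun r => PySem.Chars.join ['\n'] (r.map String.toList))) := by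
      rw [pvfix_strip_eq _ hfixinner]
      exact pvjoin_glue _ (fun r hr => (hgoodrr r hr).1)
    have hT : (if lb = true ∧ pvRR runs cur ≠ [] then [""] else ([] : List String)) =
        (if lb = true then [""] else []) := by
      by_cases h : lb = true <;> simp [h, hrre]
    rw [hcl, hT]
    cases lb with
    | false =>
      cases lead with
      | false => simpa using hcore
      | true =>
        have harg : ((if true = true then [""] else []) ++ pvGlue (pvRR runs cur) ++
            (if false = true then [""] else ([] : List String))).map String.toList =
            [[]] ++ (pvGlue (pvRR runs cur)).map String.toList := by
          simp
        rw [harg, pvstrip_join_blank_left _ hGmap]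
        exact hcore
    | true =>
      cases lead with
      | false =>
        have harg : ((if false = true then [""] else []) ++ pvGlue (pvRR runs cur) ++
            (if true = true then [""] else ([] : List String))).map String.toList =
            (pvGlue (pvRR runs cur)).map String.toList ++ [[]] := by
          simp
        rw [harg, pvstrip_join_blank_right _ hGmap]
        exact hcore
      | true =>
        have harg : ((if true = true then [""] else []) ++ pvGlue (pvRR runs cur) ++
            (if true = true then [""] else ([] : List String))).map String.toList =
            ([[]] ++ (pvGlue (pvRR runs cur)).map String.toList) ++ [[]] := by
          simp
        rw [harg, pvstrip_join_blank_right _ (by simp), pvstrip_join_blank_left _ hGmap]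
        exact hcore

-- one step preserves the invariant
lemma pvstep (cleaned : List String) (lb : Bool) (runs : List (List String))
    (cur : List String) (lead : Bool) (line : String) (hInv : pvInv cleaned lb runs cur lead) :
    ∃ lead', pvInv (pvStepA (cleaned, lb) line).1 (pvStepA (cleaned, lb) line).2
      (pvStepB (runs, cur) line).1 (pvStepB (runs, cur) line).2 lead' := by
  obtain ⟨hcl, hlbcur, hlead, hinit, hruns, hcur⟩ := hInv
  by_cases hs : PySem.Str.strip line = ""
  · -- blank line
    by_cases hlb : lb = true
    · -- A unchanged; cur = [] so B unchanged
      have hce : cur = [] := hlbcur hlb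
      have hA : pvStepA (cleaned, lb) line = (cleaned, lb) := by
        simp [pvStepA, hs, hlb]
      have hB : pvStepB (runs, cur) line = (runs, cur) := by
        simp [pvStepB, hs, hce]
      exact ⟨lead, by rw [hA, hB]; exact ⟨hcl, hlbcur, hlead, hinit, hruns, hcur⟩⟩
    · simp only [Bool.not_eq_true] at hlb
      have hA : pvStepA (cleaned, lb) line = (cleaned ++ [""], true) := by
        simp [pvStepA, hs, hlb]
      by_cases hc : cur = []
      · -- lb = false, cur = []: still the initial state
        obtain ⟨hre, hle⟩ := hinit ⟨hlb, hc⟩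
        have hB : pvStepB (runs, cur) line = (runs, cur) := by
          simp [pvStepB, hs, hc]
        have hcleaned : cleaned = [] := by
          rw [hre, hle, hc] at hcl
          simpa [pvRR, pvGlue] using hcl
        refine ⟨true, ?_⟩
        rw [hA, hB]
        refine ⟨?_, fun _ => hc, fun _ => Or.inl rfl, ?_, hruns, hcur⟩
        · rw [hcleaned, hre, hc]
          simp [pvRR, pvGlue]
        · rintro ⟨h, -⟩; cases h
      · -- lb = false, cur ≠ []: B closes the run, A appends one blank
        have hB : pvStepB (runs, cur) line = (runs ++ [cur], []) := by
          simp [pvStepB, hs, hc]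
        refine ⟨lead, ?_⟩
        rw [hA, hB]
        have hrr2 : pvRR (runs ++ [cur]) [] = pvRR runs cur := by simp [pvRR, hc]
        refine ⟨?_, fun _ => rfl, ?_, ?_, ?_, by simp⟩
        · rw [hrr2, hcl]
          have hne : pvRR runs cur ≠ [] := by simp [pvRR, hc]
          simp [hlb, hne]
        · intro h
          rcases hlead h with h1 | h1
          · exact absurd h1 (by simp [hlb])
          · right; rwa [hrr2]
        · rintro ⟨h, -⟩; cases h
        · intro r hr
          rcases List.mem_append.mp hr with hm | hm
          · exact hruns r hm
          · simp at hm; subst hm; exact ⟨hc, hcur⟩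
  · -- non-blank line
    have hgood := pvgood_strip line hs
    have hA : pvStepA (cleaned, lb) line = (cleaned ++ [PySem.Str.strip line], false) := by
      simp [pvStepA, hs]
    have hB : pvStepB (runs, cur) line = (runs, cur ++ [PySem.Str.strip line]) := by
      simp [pvStepB, hs]
    have hrr' : pvRR runs (cur ++ [PySem.Str.strip line]) =
        runs ++ [cur ++ [PySem.Str.strip line]] := by simp [pvRR]
    refine ⟨lead, ?_⟩
    rw [hA, hB]
    refine ⟨?_, by simp, ?_, ?_, hruns, ?_⟩
    · -- the list equation
      rw [hrr', pvglue_append runs (cur ++ [PySem.Str.strip line]), hcl]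
      by_cases hlb : lb = true
      · have hce : cur = [] := hlbcur hlb
        by_cases hre : runs = []
        · simp [hre, hlb, hce, pvRR, pvGlue]
        · have hrrold2 : pvRR runs [] = runs := by simp [pvRR]
          simp [hre, hrrold2, hlb, hce]
      · simp only [Bool.not_eq_true] at hlb
        by_cases hc : cur = []
        · obtain ⟨hre, -⟩ := hinit ⟨hlb, hc⟩
          simp [hre, hc, pvRR, hlb, pvGlue]
        · have hrrold : pvRR runs cur = runs ++ [cur] := by simp [pvRR, hc]
          rw [hrrold, pvglue_append runs cur]
          by_cases hre : runs = []
          · simp [hre, hlb]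
          · simp [hre, hlb]
    · intro _
      right
      rw [hrr']
      simp
    · rintro ⟨-, hc⟩
      simp at hc
    · intro s hsm
      rcases List.mem_append.mp hsm with hm | hm
      · exact hcur s hm
      · simp at hm; subst hm; exact hgood

-- the folds agree from any invariant-related pair of states
lemma pvfold (items : List String) : ∀ (cleaned : List String) (lb : Bool)
    (runs : List (List String)) (cur : List String) (lead : Bool),
    pvInv cleaned lb runs cur lead →
    PySem.Str.strip (PySem.Str.join "\n" (items.foldl pvStepA (cleaned, lb)).1) =
      (let st := items.foldl pvStepB (runs, cur)
       PySem.Str.join "\n\n"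
         ((if st.2 ≠ [] then st.1 ++ [st.2] else st.1).map (PySem.Str.join "\n"))) := by
  induction items with
  | nil =>
    intro cleaned lb runs cur lead hInv
    simpa using pvfinal cleaned lb runs cur lead hInv
  | cons line rest ih =>
    intro cleaned lb runs cur lead hInv
    obtain ⟨lead', hInv'⟩ := pvstep cleaned lb runs cur lead line hInv
    simp only [List.foldl_cons]
    have := ih (pvStepA (cleaned, lb) line).1 (pvStepA (cleaned, lb) line).2
      (pvStepB (runs, cur) line).1 (pvStepB (runs, cur) line).2 lead' hInv'
    simpa using this

-- ===== VERDICT (by name: the statement is the Claim_ definition above) =====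
theorem collapse_lines_py_spec : Claim_equal_collapse_lines_py := by
  intro lines _
  unfold Spec_collapse_lines_py collapse_lines_py collapse_lines_py_alt
  have hInv0 : pvInv [] false [] [] false := by
    refine ⟨by simp [pvRR, pvGlue], by simp, by simp, by simp, by simp, by simp⟩
  simpa using pvfold lines [] false [] [] false hInv0
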